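/- GENERATED by tools/from_farm_form.py from prooffarm-gif/accepted/DGifGetImageHeader.E/Proof.lean (a worked proof of the farm's unit `DGifGetImageHeader.E`,
   accepted by the verdict) — do not edit. -/
import Gif.Spec.Units.DGifGetImageHeader_E
import Gif.Spec.AllSegs

open X86 X86.User Asan ProgX.Base ProgX.Base.Spec Gif.Spec

set_option maxRecDepth 4000
set_option maxHeartbeats 4000000

/-!
  `DGifGetImageHeader.E` (0x108e78 … the `ret` at 0x108e94, 10 instructions; dgif_lib.c:424): THE EPILOGUE OF A PROTECTED FUNCTION
  (frame `Buf[3]`: base = RA − 120, 64 bytes). The recipe is that of farm.gif/worked/DGifGetWord.E (Gif/Spec/FrameCarry.lean §1, §2, §4):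
    1. the prelude: the entry assertion `Done` as walker facts; the shadow index register `rbp` as a word VARIABLE `b` with bounds;
    2. the walk to the `ret` (the six pops and the return address are read through the shadow store by the walker itself);
    3. `stores1_index`: `hmem : s.mem = storesMem v.mem (base / 8) F.epilogue`;
    4. `after_epilogue` (`HeapInv` for the callers' frames, `GifOK`, `rem`), `imghdrE_epilogue_same` (`Returned.same`: the frozen
       `epilogue_same` restated for TWO heaps, the entry's `H` and the present `Hc`), `LZOK.sameExcept` over
       `storesMem_sameExcept` (the LZW field ranges are not touched by the shadow store);
    5. `Returned`, field by field; the post with `H' = Hc`, `F' = Fc`.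
-/

namespace Gif.Spec.DGifGetImageHeader_E

/-- **`epilogue_same` of Gif/Spec/FrameCarry.lean FOR TWO HEAPS.** The frozen lemma asks the entry's invariant `hinv0` and the
invariant before the epilogue's stores `hinv1` for the SAME heap; `DGifGetImageHeader` frees and allocates a colour map, so `Done`
has `Body.inv` for the PRESENT heap `H1` and the precondition has it for the entry's heap `H0`. The proof never looks at the heap:
only at `ShadowInv.stack` (the stack below `top + 8` was clean at the entry; the own frame is active, so the epilogue's stores make
its shadow bytes 0 again). The frame's shadow span leaves the footprint: `Returned.same`. -/
theorem imghdrE_epilogue_same {H0 H1 : Heap} {rest : List Obj} {frames : List (Nat × FrameLayout)} {top top' ro ro' : Nat}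
    {m0 m1 : Mem} {Fl : FrameLayout} {w : Span} {ws : List Span} (hro : Fl.raOff = ro) (hro' : Fl.raOff - Fl.size = ro')
    (hinv0 : HeapInv H0 rest frames (top + 8) m0) (hinv1 : HeapInv H1 rest ((top - ro, Fl) :: frames) top' m1)
    (hra : top % 8 = 0)
    (hsame : Mem.SameExcept (w :: shadowSpan (top - ro) (top - ro') :: ws) m0 m1) :
    Mem.SameExcept (w :: ws) m0 (storesMem m1 ((top - ro) / 8) Fl.epilogue) := by
  subst hro
  subst hro'
  have hact := hinv1.shadow.stack.active (top - Fl.raOff, Fl) List.mem_cons_self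
  simp only at hact
  obtain ⟨hF, hb8, hb1, hb2, hp⟩ := hact
  have hlo := hinv1.shadow.stack.lo
  have hc1 := FrameLayout.epilogue_clean hF hb8 hb2 hp
  have hc0 := hinv0.shadow.stack.clean
  obtain ⟨hs8, _, hein, _, _, _, _, _, hr8, hrs⟩ := hF
  have hg : (top - Fl.raOff) / 8 + Fl.size / 8 ≤ 0x200000 := by omega
  have h2 := storesMem_sameExcept m1 ((top - Fl.raOff) / 8) (Fl.size / 8) Fl.epilogue hein hg
  intro a ha
  by_cases hin : 0xC00000 + (top - Fl.raOff) / 8 ≤ a.toNat ∧ a.toNat < 0xC00000 + (top - Fl.raOff) / 8 + Fl.size / 8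
  · -- a shadow byte of the frame: 0 in both memories
    have ea : a = shadowAddr (a.toNat - 0xC00000) := eq_shadowAddr a _ (by omega)
    have z1 := hc1 (a.toNat - 0xC00000) (by omega) (by omega)
    have z0 := hc0 (a.toNat - 0xC00000) (by omega) (by omega)
    unfold shadowOf at z1 z0
    rw [← ea] at z1 z0
    apply UInt8.toNat_inj.mp
    rw [z1, z0]
  · -- any other byte: neither the epilogue's stores nor the function wrote it
    have e2 : (storesMem m1 ((top - Fl.raOff) / 8) Fl.epilogue).read a = m1.read a := by
      apply h2 a
      intro x hx
      have e := List.mem_singleton.mp hx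
      rw [e]
      simp only
      omega
    rw [e2]
    apply hsame a
    intro x hx
    rcases List.mem_cons.mp hx with e | hx'
    · rw [e]
      exact ha w List.mem_cons_self
    · rcases List.mem_cons.mp hx' with e | hx''
      · rw [e]
        unfold shadowSpan
        simp only
        omega
      · exact ha x (List.mem_cons_of_mem _ hx'')

end Gif.Spec.DGifGetImageHeader_E

/-- The epilogue of `DGifGetImageHeader` takes `Done` at 0x108e78 to `Returned`. -/
theorem Gif.Spec.Proved.DGifGetImageHeader_E_ok : Gif.Spec.DGifGetImageHeader_E.Statement := by
  intro Lay hLay μ hμ u₀ hcode H rest frames F R e ret Hc Fc v hat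
  -- 1. THE PRELUDE: the entry assertion `Done` = `Body` + the result in `r13d` + the success clause
  obtain ⟨hbody, hres, hlz⟩ := hat
  have he := hbody.entry
  v_entry he
  obtain ⟨henv, hrdi⟩ := hbody.pre
  -- what the walker reads of a segment's entry state: rip, rsp (as `c_rsp`), the registers kept, the text, DF / MXCSR
  have w_rip := hbody.rip
  have c_rsp : v.reg .rsp = e.reg .rsp - 136 := hbody.rsp
  have w_kept : RegsKept [.rsp] v v := RegsKept.refl _ _
  have w_eq : Mem.EqOn ProgX.Base.L.textLo ProgX.Base.L.textHi u₀.mem v.mem := ProgX.Base.conv_code_eqOn hbody.code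
  have hdf := (show abiInv _ from hbody.abi).1
  have hmx := (show abiInv _ from hbody.abi).2
  have hsse := ProgX.Base.sseOK_of_abiInv hbody.abi
  -- the slots the six pops and the `ret` read
  have k_r15 : v.mem.readLE (e.reg .rsp - 8) 8 = (e.reg .r15).toNat := hbody.slot_r15
  have k_r14 : v.mem.readLE (e.reg .rsp - 16) 8 = (e.reg .r14).toNat := hbody.slot_r14
  have k_r13 : v.mem.readLE (e.reg .rsp - 24) 8 = (e.reg .r13).toNat := hbody.slot_r13
  have k_r12 : v.mem.readLE (e.reg .rsp - 32) 8 = (e.reg .r12).toNat := hbody.slot_r12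
  have k_rbp : v.mem.readLE (e.reg .rsp - 40) 8 = (e.reg .rbp).toNat := hbody.slot_rbp
  have k_rbx : v.mem.readLE (e.reg .rsp - 48) 8 = (e.reg .rbx).toNat := hbody.slot_rbx
  have k_ra : UInt64.ofNat (v.mem.readLE (e.reg .rsp) 8) = ret := hbody.slot_ra
  -- the result register as a variable: `mov eax, r13d` zero-extends it
  obtain ⟨z, c_r13⟩ : ∃ z : Word, v.reg .r13 = z := ⟨_, rfl⟩
  rw [c_r13] at hres hlz
  -- THE SHADOW INDEX REGISTER AS A VARIABLE `b` WITH BOUNDS: no `>>> 3` is in the walk's context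
  have e120 : (e.reg .rsp - 120).toNat = (e.reg .rsp).toNat - 120 := by u_omega
  obtain ⟨b, hb⟩ : ∃ b : Word, b = (e.reg .rsp - 120) >>> 3 := ⟨_, rfl⟩
  have hbn : b.toNat = ((e.reg .rsp).toNat - 120) / 8 := by
    rw [hb, Asan.toNat_shr3, e120]
  have hb1 : 0xE0000 ≤ b.toNat := by omega
  have hb2 : b.toNat + 8 ≤ 0x100000 := by omega
  have c_rbp : v.reg .rbp = b := by
    rw [hb]
    exact hbody.rbp
  clear hb
  -- 2. THE WALK (0x108e78 … 0x108e94, dgif_lib.c:424), to the `ret`: no side goal is left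
  u_walk hcode [hμ.vendor] span [ProgX.Base.L.textLo, ProgX.Base.L.textHi] side (v_side)
  -- 3. THE EPILOGUE'S STORE AS THE LAYOUT'S `storesMem`: the displacement as the walker prints it, granule offset, width, value
  have hepi : Gif.Frames.DGifGetImageHeader.epilogue = [⟨0, 8, 0⟩] := rfl
  have hmem : s_108e94.mem = storesMem v.mem (((e.reg .rsp).toNat - 120) / 8) Gif.Frames.DGifGetImageHeader.epilogue := by
    rw [hepi, w_mem, ← hbn]
    exact stores1_index v.mem b 12582912 0 8 0 (by omega) (by decide) (by decide)
  have hin : ∀ s, s ∈ Gif.Frames.DGifGetImageHeader.epilogue → s.idx + s.width ≤ 8 := by decide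
  clear w_mem
  -- 4. THE ENVIRONMENT behind the epilogue: the callers' frames, the clean stack ends above the return address
  obtain ⟨hinv2, hok2, hrem2⟩ := after_epilogue (top := (e.reg .rsp).toNat) (ro := 120) (Fl := Gif.Frames.DGifGetImageHeader) rfl
    hbody.inv henv.ctx hbody.ok he_align he_top henv.heap.inv.frames_above
  -- the frame's shadow span leaves the footprint (the entry's invariant is for `H`, `Body.inv` for `Hc`: the two-heap form)
  have hsame2 := Gif.Spec.DGifGetImageHeader_E.imghdrE_epilogue_same (top := (e.reg .rsp).toNat) (ro := 120) (ro' := 56) (Fl := Gif.Frames.DGifGetImageHeader) rfl rfl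
    henv.heap.inv hbody.inv he_align hbody.same
  -- the shadow store writes 8 shadow bytes only: above every heap object, so the LZW field ranges of pv are kept
  have hst : Mem.SameExcept
      [⟨0xC00000 + ((e.reg .rsp).toNat - 120) / 8, 0xC00000 + ((e.reg .rsp).toNat - 120) / 8 + 8⟩] v.mem
      (storesMem v.mem (((e.reg .rsp).toNat - 120) / 8) Gif.Frames.DGifGetImageHeader.epilogue) :=
    storesMem_sameExcept v.mem _ 8 _ hin (by omega)
  rw [← hmem] at hinv2 hok2 hrem2 hsame2 hst
  -- where pv is: inside the heap's region, below the shadow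
  have hpv : Fc.pv = F.pv := hbody.forest.2.1
  have hpin := (hbody.ok.owns.inside hbody.inv.heap (o := (Fc.pv, 24936)) (List.mem_cons_of_mem _ List.mem_cons_self)).2.2.2.2
  simp only at hpin
  rw [hpv] at hpin
  -- the result register: `mov eax, r13d`
  have e_rax : (s_108e94.reg .rax).toNat = z.toNat % 2 ^ 32 := by
    rw [w_rax, toNat_ofBV32, toNat_part32]
  -- 5. `Returned`, field by field
  refine ReachVia.done ?_
  refine X86.User.Returned.mk w_rip w_rsp ?saved ?same (ProgX.Base.conv_code_in w_eq) ?abi ?post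
  case saved =>
    -- the six popped registers are the walker's facts
    intro r hr
    cases r <;> first
      | exact absurd hr (by decide)
      | (with_reducible assumption)
  case same =>
    simp only [X86.User.Spec.footprint, vspec]
    exact hsame2
  case abi =>
    -- DF and MXCSR by hand (`v_inv` is slow behind a walk with shadow stores)
    refine ProgX.Base.abiInv_of ?_ ?_
    · rw [w_flags]
      simp only [X86.User.df_setStatus]
      exact hdf
    · rw [w_mxcsr]
      exact hmx
  case post =>
    -- `Back2` for the present heap `Hc` and forest `Fc`, the forest's clause, the result, the success clause
    refine ⟨Hc, Fc, ⟨hbody.region, hinv2, hok2, ?_⟩, hbody.forest, ?_, ?_⟩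
    · rw [hrem2]
      exact hbody.rem
    · unfold IsBool
      rw [e_rax]
      exact hres
    · intro h1
      rw [e_rax] at h1
      refine (hlz h1).sameExcept hst (by omega) ?_
      intro w hw
      have ew := List.mem_singleton.mp hw
      rw [ew]
      simp only
      omega
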